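-- pv_equiv track=rewrite | github.com/Julesc013/dominium | tools/xstack/testx/tests/sol0_testlib.py | effective_object_map
-- ===== SOURCE A (Python) =====
-- from typing import Dict, List, Mapping
--
-- def _as_list(value: object) -> List[object]:
--     return list(value or []) if isinstance(value, list) else []
--
-- def effective_object_map(rows: object) -> Dict[str, dict]:
--     out: Dict[str, dict] = {}
--     for row in _as_list(rows):
--         if not isinstance(row, Mapping):
--             continue
--         object_id = str(dict(row).get("object_id", "")).strip()
--         if object_id:
--             out[object_id] = dict(row)
--     return dict((object_id, dict(out[object_id])) for object_id in sorted(out.keys()))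
-- ===== SOURCE B (Python) =====
-- from typing import Dict, List, Mapping
--
-- def effective_object_map(rows: object) -> Dict[str, dict]:
--     items = rows if isinstance(rows, list) else []
--     seen = set()
--     pairs = []
--     for row in reversed(items or []):
--         if not isinstance(row, Mapping):
--             continue
--         object_id = str(dict(row).get("object_id", "")).strip()
--         if object_id and object_id not in seen:
--             seen.add(object_id)
--             pairs.append((object_id, dict(row)))
--     pairs.sort(key=lambda p: p[0])
--     return dict(pairs)
-- ===== Notes on version B (the rewrite author's own statement) =====
-- stated objective: alternative
-- what changed: A scans forward maintaining a last-wins dict and then builds the result over its sorted keys; B scans the rows in reverse keeping the first hit per object_id with a seen-set, sorts the unique (id, row) pairs once, and builds the dict in a single pass.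
import Mathlib
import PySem

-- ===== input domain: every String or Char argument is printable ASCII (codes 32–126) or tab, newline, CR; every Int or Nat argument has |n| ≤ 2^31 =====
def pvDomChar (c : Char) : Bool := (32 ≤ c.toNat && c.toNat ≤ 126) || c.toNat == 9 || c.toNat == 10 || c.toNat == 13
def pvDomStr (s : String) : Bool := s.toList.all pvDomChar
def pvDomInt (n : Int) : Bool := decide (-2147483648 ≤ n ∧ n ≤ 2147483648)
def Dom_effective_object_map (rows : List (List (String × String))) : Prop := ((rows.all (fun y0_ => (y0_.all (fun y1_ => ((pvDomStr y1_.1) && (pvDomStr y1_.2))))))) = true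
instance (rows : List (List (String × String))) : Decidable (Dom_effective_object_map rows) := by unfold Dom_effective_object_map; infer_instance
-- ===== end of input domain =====

-- B replaces A's "scan forward maintaining a dict, then sort the keys" by "reverse scan keeping
-- the first hit per id (= last row) with a seen-set, sort the unique pairs once, build the dict
-- in one pass" (objective: alternative decomposition, same cost).


-- shared helpers: 'dict(row)' (Python dict(pairs): last value wins, first position kept)
-- and 'str(dict(row).get("object_id", "")).strip()' (values are str, so str() is identity)
def pvRowDict (row : List (String × String)) : PySem.Dict String String :=
  PySem.Dict.ofList row

def pvRowId (row : List (String × String)) : String :=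
  PySem.Str.strip (PySem.Dict.getD (pvRowDict row) "object_id" "")

-- ===== PORT A =====
-- rows is typed List (List (String × String)), so '_as_list' and the Mapping test are identities;
-- 'dict(out[object_id])' copies a dict, which is the identity on its items.
def effective_object_map (rows : List (List (String × String))) : List (String × List (String × String)) :=
  let out : PySem.Dict String (PySem.Dict String String) :=
    rows.foldl (fun out row =>
      if pvRowId row ≠ "" then out.insert (pvRowId row) (pvRowDict row) else out)
      PySem.Dict.empty
  ((PySem.List.sorted out.keys (fun k => k)).foldl
      (fun acc k => acc.insert k (PySem.Dict.getD out k PySem.Dict.empty).items)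
      PySem.Dict.empty).items

-- ===== PORT B =====
-- reverse scan with a seen-set keeps the first occurrence per id (= last row),
-- then one stable sort of the unique pairs, then dict(pairs)
def effective_object_map_alt (rows : List (List (String × String))) : List (String × List (String × String)) :=
  let scan :=
    rows.reverse.foldl (fun (st : PySem.Set String × List (String × List (String × String))) row =>
      if pvRowId row ≠ "" then
        (if PySem.Set.contains st.1 (pvRowId row) then st
         else (PySem.Set.add st.1 (pvRowId row), st.2 ++ [(pvRowId row, (pvRowDict row).items)]))
      else st)
      (PySem.Set.empty, [])
  (PySem.Dict.ofList (PySem.List.sorted scan.2 (fun p => p.1))).items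

-- ===== PRECONDITION & SPEC =====
def Spec_effective_object_map (rows : List (List (String × String))) (out : List (String × List (String × String))) : Prop := out = effective_object_map_alt rows
instance (rows : List (List (String × String))) (out : List (String × List (String × String))) : Decidable (Spec_effective_object_map rows out) := by unfold Spec_effective_object_map; infer_instance

-- ===== CLAIM (what is proved, stated in full; the proofs are below) =====
def Claim_equal_effective_object_map : Prop := ∀ (rows : List (List (String × String))), Dom_effective_object_map rows → Spec_effective_object_map rows (effective_object_map rows)

-- ===== LEMMAS AND PROOFS =====

-- the rows that contribute, A's dict, B's scan step and B's pair list
def pvRows (rows : List (List (String × String))) : List (List (String × String)) :=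
  rows.filter (fun r => decide (pvRowId r ≠ ""))

def pvOut (rows : List (List (String × String))) : PySem.Dict String (PySem.Dict String String) :=
  (pvRows rows).foldl (fun d r => d.insert (pvRowId r) (pvRowDict r)) PySem.Dict.empty

def pvStep (st : PySem.Set String × List (String × List (String × String)))
    (row : List (String × String)) : PySem.Set String × List (String × List (String × String)) :=
  if PySem.Set.contains st.1 (pvRowId row) then st
  else (PySem.Set.add st.1 (pvRowId row), st.2 ++ [(pvRowId row, (pvRowDict row).items)])

def pvPairs (rows : List (List (String × String))) : List (String × List (String × String)) :=
  ((pvRows rows).reverse.foldl pvStep (PySem.Set.empty, [])).2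

-- lookup in A's dict fold is the last matching row
theorem pvA1 (l : List (List (String × String))) (d : PySem.Dict String (PySem.Dict String String)) (k : String) :
    (l.foldl (fun d r => d.insert (pvRowId r) (pvRowDict r)) d).get? k =
      match l.reverse.find? (fun r => pvRowId r == k) with
      | some r => some (pvRowDict r)
      | none => d.get? k := by
  induction l generalizing d with
  | nil => simp
  | cons r l ih =>
    simp only [List.foldl_cons, List.reverse_cons, List.find?_append, ih]
    rcases h : l.reverse.find? (fun r => pvRowId r == k) with _ | r'
    · by_cases hk : pvRowId r = k
      · simp [hk]
      · simp [PySem.Dict.get?_insert, hk, Ne.symm hk]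
    · simp

-- B's scan: nodup first components, and membership = first matching row of the scanned list
theorem pvBmain (l : List (List (String × String))) (s : PySem.Set String)
    (acc : List (String × List (String × String)))
    (hinv : ∀ j, j ∈ s ↔ j ∈ acc.map Prod.fst) (hnd : (acc.map Prod.fst).Nodup) :
    (((l.foldl pvStep (s, acc)).2.map Prod.fst).Nodup ∧
      ∀ k v, ((k, v) ∈ (l.foldl pvStep (s, acc)).2 ↔
        (k, v) ∈ acc ∨ (k ∉ s ∧ ∃ r, l.find? (fun r => pvRowId r == k) = some r ∧ v = (pvRowDict r).items))) := by
  induction l generalizing s acc with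
  | nil => exact ⟨hnd, by simp⟩
  | cons r l ih =>
    simp only [List.foldl_cons]
    by_cases hm : pvRowId r ∈ s
    · have hstep : pvStep (s, acc) r = (s, acc) := by
        simp [pvStep]
        exact hm
      rw [hstep]
      obtain ⟨ihnd, ihmem⟩ := ih s acc hinv hnd
      refine ⟨ihnd, fun k v => ?_⟩
      rw [ihmem k v]
      by_cases hk : pvRowId r = k
      · have hks : k ∈ s := hk ▸ hm
        simp [hk, hks]
      · simp [fun h => hk (by simpa using h)]
    · have hka : pvRowId r ∉ acc.map Prod.fst := fun h => hm ((hinv _).mpr h)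
      have haccr : ∀ w, (pvRowId r, w) ∉ acc := fun w h => hka (List.mem_map_of_mem h)
      have hstep : pvStep (s, acc) r =
          (PySem.Set.add s (pvRowId r), acc ++ [(pvRowId r, (pvRowDict r).items)]) := by
        simp [pvStep]
        exact hm
      rw [hstep]
      have hinv' : ∀ j, j ∈ PySem.Set.add s (pvRowId r) ↔
          j ∈ (acc ++ [(pvRowId r, (pvRowDict r).items)]).map Prod.fst := by
        intro j
        rw [PySem.Set.mem_add]
        simp [hinv j]
      have hnd' : ((acc ++ [(pvRowId r, (pvRowDict r).items)]).map Prod.fst).Nodup := by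
        simp only [List.map_append, List.map_cons, List.map_nil]
        exact List.Nodup.append hnd (List.nodup_singleton _) (by simpa using hka)
      obtain ⟨ihnd, ihmem⟩ := ih _ _ hinv' hnd'
      refine ⟨ihnd, fun k v => ?_⟩
      rw [ihmem k v]
      by_cases hk : pvRowId r = k
      · subst hk
        constructor
        · rintro (h | ⟨h1, _⟩)
          · rcases List.mem_append.mp h with h | h
            · exact absurd h (haccr v)
            · simp only [List.mem_singleton, Prod.mk.injEq, true_and] at h
              exact Or.inr ⟨hm, r, by simp, h⟩
          · exact absurd ((PySem.Set.mem_add s _ _).mpr (Or.inr rfl)) h1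
        · rintro (h | ⟨_, r', hr', hv⟩)
          · exact absurd h (haccr v)
          · simp only [List.find?_cons, beq_self_eq_true] at hr'
            obtain rfl : r = r' := Option.some.inj hr'
            exact Or.inl (by simp [hv])
      · have hmem' : ((k, v) ∈ acc ++ [(pvRowId r, (pvRowDict r).items)]) ↔ (k, v) ∈ acc := by
          simp [Ne.symm hk]
        rw [hmem']
        have hs' : (k ∉ PySem.Set.add s (pvRowId r)) ↔ k ∉ s := by
          rw [PySem.Set.mem_add]
          simp [Ne.symm hk]
        rw [hs']
        have hf : (r :: l).find? (fun r => pvRowId r == k) = l.find? (fun r => pvRowId r == k) := by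
          simp [hk]
        rw [hf]

theorem pvKeysNodup (rows : List (List (String × String))) : (pvOut rows).keys.Nodup := by
  unfold pvOut
  exact PySem.Dict.nodup_keys_foldl_insert_key _ pvRowId (fun _ r => pvRowDict r) _
    (by simp [PySem.Dict.empty])

theorem pvA_eq (rows : List (List (String × String))) :
    effective_object_map rows =
      (PySem.List.sorted (pvOut rows).keys (fun k => k)).map
        (fun k => (k, (PySem.Dict.getD (pvOut rows) k PySem.Dict.empty).items)) := by
  unfold effective_object_map
  have h1 : rows.foldl (fun out row =>
      if pvRowId row ≠ "" then out.insert (pvRowId row) (pvRowDict row) else out)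
      PySem.Dict.empty = pvOut rows := by
    rw [PySem.List.foldl_ite_eq_foldl_filter (fun row => pvRowId row ≠ "")
      (fun out row => out.insert (pvRowId row) (pvRowDict row)) rows PySem.Dict.empty]
    rfl
  rw [h1]
  have hnd : (PySem.List.sorted (pvOut rows).keys (fun k => k)).Nodup :=
    (PySem.List.sorted_perm _ _ _).nodup_iff.mpr (pvKeysNodup rows)
  have := PySem.Dict.items_foldl_insert_fresh
    (PySem.List.sorted (pvOut rows).keys (fun k => k)) (fun k => k)
    (fun k => (PySem.Dict.getD (pvOut rows) k PySem.Dict.empty).items) PySem.Dict.empty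
    (fun a _ => PySem.Dict.contains_empty a) (by simpa using hnd)
  simpa using this

theorem pvPairsNodupFst (rows : List (List (String × String))) :
    ((pvPairs rows).map Prod.fst).Nodup := by
  unfold pvPairs
  exact (pvBmain ((pvRows rows).reverse) PySem.Set.empty [] (by simp [PySem.Set.empty]) (by simp)).1

theorem pvPairsMem (rows : List (List (String × String))) (k : String) (v : List (String × String)) :
    ((k, v) ∈ pvPairs rows ↔
      ∃ r, (pvRows rows).reverse.find? (fun r => pvRowId r == k) = some r ∧ v = (pvRowDict r).items) := by
  unfold pvPairs
  rw [(pvBmain ((pvRows rows).reverse) PySem.Set.empty [] (by simp [PySem.Set.empty]) (by simp)).2 k v]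
  simp [PySem.Set.empty]

theorem pvB_eq (rows : List (List (String × String))) :
    effective_object_map_alt rows = PySem.List.sorted (pvPairs rows) (fun p => p.1) := by
  unfold effective_object_map_alt
  have h1 : rows.reverse.foldl (fun (st : PySem.Set String × List (String × List (String × String))) row =>
      if pvRowId row ≠ "" then
        (if PySem.Set.contains st.1 (pvRowId row) then st
         else (PySem.Set.add st.1 (pvRowId row), st.2 ++ [(pvRowId row, (pvRowDict row).items)]))
      else st) (PySem.Set.empty, []) = (pvRows rows).reverse.foldl pvStep (PySem.Set.empty, []) := by
    show rows.reverse.foldl (fun st row => if pvRowId row ≠ "" then pvStep st row else st)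
      (PySem.Set.empty, []) = _
    rw [PySem.List.foldl_ite_eq_foldl_filter (fun row => pvRowId row ≠ "") pvStep rows.reverse
      (PySem.Set.empty, [])]
    rw [List.filter_reverse]
    rfl
  rw [h1]
  have hnd' : ((PySem.List.sorted (pvPairs rows) (fun p => p.1)).map Prod.fst).Nodup :=
    ((List.Perm.map Prod.fst (PySem.List.sorted_perm (pvPairs rows) (fun p => p.1) false)).nodup_iff).mpr
      (pvPairsNodupFst rows)
  have := PySem.Dict.items_foldl_insert_fresh
    (PySem.List.sorted (pvPairs rows) (fun p => p.1)) Prod.fst Prod.snd PySem.Dict.empty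
    (fun a _ => PySem.Dict.contains_empty a.1) hnd'
  simp only [Prod.mk.eta, List.map_id'] at this
  show ((PySem.List.sorted (pvPairs rows) (fun p => p.1)).foldl
      (fun d a => d.insert a.1 a.2) PySem.Dict.empty).items = _
  rw [this]
  rfl

theorem pvPerm (rows : List (List (String × String))) :
    (effective_object_map rows).Perm (pvPairs rows) := by
  rw [pvA_eq]
  have hK := pvKeysNodup rows
  refine (List.Perm.map _ (PySem.List.sorted_perm (pvOut rows).keys (fun k => k) false)).trans ?_
  have hnd1 : ((pvOut rows).keys.map
      (fun k => (k, (PySem.Dict.getD (pvOut rows) k PySem.Dict.empty).items))).Nodup :=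
    hK.map (fun a b h => congrArg Prod.fst h)
  have hnd2 : (pvPairs rows).Nodup := List.Nodup.of_map Prod.fst (pvPairsNodupFst rows)
  rw [List.perm_ext_iff_of_nodup hnd1 hnd2]
  rintro ⟨k, v⟩
  rw [pvPairsMem rows k v]
  have hget : (pvOut rows).get? k =
      match (pvRows rows).reverse.find? (fun r => pvRowId r == k) with
      | some r => some (pvRowDict r)
      | none => PySem.Dict.empty.get? k := pvA1 (pvRows rows) PySem.Dict.empty k
  rcases hfind : (pvRows rows).reverse.find? (fun r => pvRowId r == k) with _ | r
  · rw [hfind] at hget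
    simp only [PySem.Dict.get?_empty] at hget
    have hknot : k ∉ (pvOut rows).keys := (PySem.Dict.get?_eq_none_iff_not_mem_keys _ _).mp hget
    simp only [List.mem_map]
    constructor
    · rintro ⟨k', hk', heq⟩
      obtain rfl : k' = k := congrArg Prod.fst heq
      exact absurd hk' hknot
    · rintro ⟨r, hr, _⟩
      exact absurd hr (by simp)
  · rw [hfind] at hget
    have hget2 : (pvOut rows).get? k = some (pvRowDict r) := hget
    have hmemit := PySem.Dict.mem_items_of_get?_eq_some _ hget2
    have hkK : k ∈ (pvOut rows).keys := PySem.Dict.mem_keys_of_mem_items _ hmemit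
    have hgd : PySem.Dict.getD (pvOut rows) k PySem.Dict.empty = pvRowDict r :=
      PySem.Dict.getD_of_get?_eq_some _ PySem.Dict.empty hget2
    simp only [List.mem_map]
    constructor
    · rintro ⟨k', hk', heq⟩
      have h1 : k' = k := congrArg Prod.fst heq
      have hv : v = (PySem.Dict.getD (pvOut rows) k PySem.Dict.empty).items := by
        rw [← h1]
        exact (congrArg Prod.snd heq).symm
      exact ⟨r, rfl, by rw [hv, hgd]⟩
    · rintro ⟨r', hr', hv⟩
      obtain rfl : r = r' := Option.some.inj hr'
      exact ⟨k, hkK, by rw [hv, hgd]⟩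

theorem pvMain (rows : List (List (String × String))) :
    effective_object_map rows = effective_object_map_alt rows := by
  rw [pvB_eq]
  have hndA : (effective_object_map rows).Nodup :=
    (pvPerm rows).nodup_iff.mpr (List.Nodup.of_map Prod.fst (pvPairsNodupFst rows))
  have hlt : (effective_object_map rows).Pairwise (fun a b => a.1 < b.1) := by
    rw [pvA_eq]
    rw [List.pairwise_map]
    have hle := PySem.List.sorted_pairwise (pvOut rows).keys (fun k => k)
    have hne : (PySem.List.sorted (pvOut rows).keys (fun k => k)).Pairwise (fun a b => a ≠ b) :=
      (PySem.List.sorted_perm _ _ _).nodup_iff.mpr (pvKeysNodup rows)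
    exact (hle.and hne).imp (fun h => lt_of_le_of_ne h.1 h.2)
  exact (PySem.List.sorted_eq_of_perm_of_pairwise_lt (pvPairs rows) (effective_object_map rows)
    (fun p => p.1) (pvPerm rows) hlt).symm

-- ===== VERDICT (by name: the statement is the Claim_ definition above) =====
theorem effective_object_map_spec : Claim_equal_effective_object_map := by
  intro rows _
  unfold Spec_effective_object_map
  exact pvMain rows
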